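-- pv_equiv track=rewrite | github.com/EliyahuAI/mcp-server-hyperplexity | src/shared/shared_table_parser.py | _trim_trailing_empty_csv
-- ===== SOURCE A (Python) =====
-- def _trim_trailing_empty_csv(row):
--     """CSV version of trailing empty cell removal."""
--     last_content_idx = -1
--     for i, cell in enumerate(row):
--         if str(cell).strip():
--             last_content_idx = i
--
--     if last_content_idx >= 0:
--         return row[:last_content_idx + 1]
--     else:
--         return row[:1] if row else []
-- ===== SOURCE B (Python) =====
-- def _trim_trailing_empty_csv(row):
--     """CSV version of trailing empty cell removal."""
--     n = len(row)
--     while n > 0 and not str(row[n - 1]).strip():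
--         n -= 1
--     if n > 0:
--         return row[:n]
--     return row[:1] if row else []
-- ===== Notes on version B (the rewrite author's own statement) =====
-- stated objective: alternative
-- what changed: B shrinks a length counter from the end of the row with early termination instead of A's forward scan that records the last non-empty index over the whole row.
import Mathlib
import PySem

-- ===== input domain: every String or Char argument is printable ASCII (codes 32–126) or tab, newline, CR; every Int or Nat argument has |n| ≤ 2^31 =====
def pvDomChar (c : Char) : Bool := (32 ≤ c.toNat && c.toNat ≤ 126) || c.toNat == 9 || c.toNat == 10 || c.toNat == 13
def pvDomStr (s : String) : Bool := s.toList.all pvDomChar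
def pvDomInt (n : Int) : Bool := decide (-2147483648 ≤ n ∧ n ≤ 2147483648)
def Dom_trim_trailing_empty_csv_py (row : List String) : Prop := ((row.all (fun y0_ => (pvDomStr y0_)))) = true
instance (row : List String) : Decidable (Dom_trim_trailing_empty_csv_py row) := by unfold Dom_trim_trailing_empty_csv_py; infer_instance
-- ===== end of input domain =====

-- B trims by shrinking a length counter from the end (early termination) instead of A's
-- forward scan recording the last non-empty index; same return value everywhere (alternative).

-- ===== PORT A =====
-- for i, cell in enumerate(row): if str(cell).strip(): last_content_idx = i
def trim_trailing_empty_csv_py (row : List String) : List String :=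
  let last_content_idx : Int :=
    (PySem.List.enumerate row 0).foldl
      (fun acc p => if PySem.Str.strip p.2 ≠ "" then p.1 else acc) (-1)
  if 0 ≤ last_content_idx then
    PySem.List.slice row none (some (last_content_idx + 1))
  else
    if row ≠ [] then PySem.List.slice row none (some 1) else []

-- ===== PORT B =====
-- while n > 0 and not str(row[n-1]).strip(): n -= 1   (recursion on n; the index n-1 is
-- always in range 0 ≤ n-1 < len row here, so List.getD is exact for row[n-1])
def pvShrink (row : List String) : Nat → Nat
  | 0 => 0
  | n+1 => if PySem.Str.strip (row.getD n "") = "" then pvShrink row n else n + 1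

def trim_trailing_empty_csv_py_alt (row : List String) : List String :=
  let n := pvShrink row row.length
  if n > 0 then PySem.List.slice row none (some (n : Int))
  else if row ≠ [] then PySem.List.slice row none (some 1) else []

-- ===== PRECONDITION & SPEC =====
def Spec_trim_trailing_empty_csv_py (row : List String) (out : List String) : Prop := out = trim_trailing_empty_csv_py_alt row
instance (row : List String) (out : List String) : Decidable (Spec_trim_trailing_empty_csv_py row out) := by unfold Spec_trim_trailing_empty_csv_py; infer_instance

-- ===== CLAIM (what is proved, stated in full; the proofs are below) =====
def Claim_equal_trim_trailing_empty_csv_py : Prop := ∀ (row : List String), Dom_trim_trailing_empty_csv_py row → Spec_trim_trailing_empty_csv_py row (trim_trailing_empty_csv_py row)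

-- ===== LEMMAS AND PROOFS =====

-- A's fold, named for the lemmas
def pvLast (row : List String) : Int :=
  (PySem.List.enumerate row 0).foldl
    (fun acc p => if PySem.Str.strip p.2 ≠ "" then p.1 else acc) (-1)

-- shrinking only inspects indices < n, so a longer list agrees while n stays in the prefix
lemma pvShrink_append (xs : List String) (x : String) :
    ∀ n, n ≤ xs.length → pvShrink (xs ++ [x]) n = pvShrink xs n := by
  intro n
  induction n with
  | zero => intro _; rfl
  | succ n ih =>
    intro hn
    have hlt : n < xs.length := by omega
    have : (xs ++ [x]).getD n "" = xs.getD n "" := by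
      simp [List.getD, List.getElem?_append_left hlt]
    simp only [pvShrink, this]
    split <;> simp [ih (by omega)]

lemma pvLast_append (xs : List String) (x : String) :
    pvLast (xs ++ [x]) =
      if PySem.Str.strip x ≠ "" then (xs.length : Int) else pvLast xs := by
  unfold pvLast
  rw [PySem.List.enumerate_append, List.foldl_append]
  simp

-- the key invariant: B's shrunken length is A's last index + 1
lemma pvShrink_eq_last (row : List String) :
    (pvShrink row row.length : Int) = pvLast row + 1 := by
  induction row using List.reverseRecOn with
  | nil => simp [pvShrink, pvLast, PySem.List.enumerate]
  | append_singleton xs x ih =>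
    have hlen : (xs ++ [x]).length = xs.length + 1 := by simp
    rw [hlen, pvLast_append]
    have hget : (xs ++ [x]).getD xs.length "" = x := by
      simp [List.getD]
    simp only [pvShrink, hget]
    by_cases h : PySem.Str.strip x = ""
    · rw [if_pos h, if_neg (by simp [h]), pvShrink_append xs x xs.length le_rfl, ih]
    · rw [if_neg h, if_pos h]
      push_cast
      ring

-- ===== VERDICT (by name: the statement is the Claim_ definition above) =====
theorem trim_trailing_empty_csv_py_spec : Claim_equal_trim_trailing_empty_csv_py := by
  intro row _
  unfold Spec_trim_trailing_empty_csv_py trim_trailing_empty_csv_py trim_trailing_empty_csv_py_alt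
  have key := pvShrink_eq_last row
  unfold pvLast at key
  set L := (PySem.List.enumerate row 0).foldl
      (fun acc p => if PySem.Str.strip p.2 ≠ "" then p.1 else acc) (-1) with hL
  set n := pvShrink row row.length with hn
  by_cases h : 0 ≤ L
  · have hpos : n > 0 := by omega
    rw [if_pos h, if_pos hpos]
    have : (n : Int) = L + 1 := key
    rw [← this]
  · have hz : n = 0 := by omega
    rw [if_neg h]
    simp [hz]
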